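-- pv_equiv track=rewrite | github.com/bhofmei/analysis-scripts | methyl/dmr_c_coverage.py | countC
-- ===== SOURCE A (Python) =====
-- def countC( allcDict, start, end ):
--
-- 	count = 0
-- 	reads = 0
-- 	for i in range(start, end+1):
-- 		t = allcDict.get(i)
-- 		if t != None:
-- 			reads += t
-- 			count += 1
-- 	return reads, count
-- ===== SOURCE B (Python) =====
-- def countC(allcDict, start, end):
--     reads = 0
--     count = 0
--     for k, v in allcDict.items():
--         if k in range(start, end + 1):
--             reads += v
--             count += 1
--     return reads, count
-- ===== Notes on version B (the rewrite author's own statement) =====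
-- stated objective: alternative
-- what changed: B iterates once over the dictionary's stored items testing each key for membership in the window, instead of probing every integer of range(start, end+1) with dict.get; cost becomes O(len(dict)) rather than O(end-start).
import Mathlib
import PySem

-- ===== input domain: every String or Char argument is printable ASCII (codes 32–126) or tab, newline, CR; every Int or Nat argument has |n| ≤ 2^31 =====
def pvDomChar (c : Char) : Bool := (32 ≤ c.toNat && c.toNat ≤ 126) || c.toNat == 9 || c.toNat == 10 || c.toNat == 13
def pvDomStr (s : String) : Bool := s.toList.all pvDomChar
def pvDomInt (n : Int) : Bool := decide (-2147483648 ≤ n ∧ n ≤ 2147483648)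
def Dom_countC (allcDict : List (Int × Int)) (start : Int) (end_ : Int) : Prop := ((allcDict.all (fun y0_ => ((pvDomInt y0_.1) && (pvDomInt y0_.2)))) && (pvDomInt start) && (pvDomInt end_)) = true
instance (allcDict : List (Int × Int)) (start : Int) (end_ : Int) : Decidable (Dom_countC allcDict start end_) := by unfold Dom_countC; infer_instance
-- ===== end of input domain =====

-- B traverses the dictionary's items once, testing each key for membership in the window,
-- instead of probing every integer in range(start, end+1) with dict.get (alternative traversal).


-- ===== PORT A =====
-- allcDict.get(i): first match in the association list (a Python dict has unique keys)
def pvGetA (xs : List (Int × Int)) (i : Int) : Option Int :=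
  match xs with
  | [] => none
  | (k, v) :: rest => if k = i then some v else pvGetA rest i

def countC (allcDict : List (Int × Int)) (start : Int) (end_ : Int) : Int × Int :=
  -- state is (reads, count); loop over range(start, end+1)
  (PySem.List.pyRange start (end_ + 1) 1).foldl
    (fun (s : Int × Int) i =>
      match pvGetA allcDict i with
      | some t => (s.1 + t, s.2 + 1)
      | none => s)
    (0, 0)

-- ===== PORT B =====
def countC_alt (allcDict : List (Int × Int)) (start : Int) (end_ : Int) : Int × Int :=
  -- loop over the items; `k in range(start, end+1)` on an int key is start ≤ k < end+1
  allcDict.foldl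
    (fun (s : Int × Int) kv =>
      if start ≤ kv.1 ∧ kv.1 < end_ + 1 then (s.1 + kv.2, s.2 + 1) else s)
    (0, 0)

-- ===== PRECONDITION & SPEC =====
-- Pre_ requires distinct keys: every Python dict has unique keys, so an association list with a
-- duplicate key corresponds to no Python input; there A's get-per-integer and B's per-item scan differ.
def Pre_countC (allcDict : List (Int × Int)) (start : Int) (end_ : Int) : Prop :=
  (allcDict.map Prod.fst).Nodup
instance (allcDict : List (Int × Int)) (start : Int) (end_ : Int) : Decidable (Pre_countC allcDict start end_) := by unfold Pre_countC; infer_instance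

def pvWitness_countC : (List (Int × Int)) × Int × Int := ([(1, 2), (3, 4), (7, 1)], 2, 5)

def Spec_countC (allcDict : List (Int × Int)) (start : Int) (end_ : Int) (out : Int × Int) : Prop := out = countC_alt allcDict start end_
instance (allcDict : List (Int × Int)) (start : Int) (end_ : Int) (out : Int × Int) : Decidable (Spec_countC allcDict start end_ out) := by unfold Spec_countC; infer_instance

-- ===== CLAIM (what is proved, stated in full; the proofs are below) =====
def Claim_equal_countC : Prop := ∀ (allcDict : List (Int × Int)) (start : Int) (end_ : Int), Dom_countC allcDict start end_ → Pre_countC allcDict start end_ → Spec_countC allcDict start end_ (countC allcDict start end_)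

-- ===== LEMMAS AND PROOFS =====

-- reference value: recursion over the items
def pvF (xs : List (Int × Int)) (s e : Int) : Int × Int :=
  match xs with
  | [] => (0, 0)
  | (k, v) :: rest => if s ≤ k ∧ k < e then (v, 1) + pvF rest s e else pvF rest s e

-- the contribution of one probed integer in A
def pvC (xs : List (Int × Int)) (i : Int) : Int × Int :=
  match pvGetA xs i with
  | some t => (t, 1)
  | none => (0, 0)

theorem pvC_cons (k v : Int) (rest : List (Int × Int)) (i : Int) :
    pvC ((k, v) :: rest) i = if k = i then (v, 1) else pvC rest i := by
  simp only [pvC, pvGetA]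
  split_ifs <;> rfl

theorem pvA_shift (d : List (Int × Int)) (l : List Int) (s : Int × Int) :
    l.foldl (fun (s : Int × Int) i =>
      match pvGetA d i with
      | some t => (s.1 + t, s.2 + 1)
      | none => s) s
    = s + l.foldl (fun (s : Int × Int) i =>
      match pvGetA d i with
      | some t => (s.1 + t, s.2 + 1)
      | none => s) (0, 0) := by
  induction l generalizing s with
  | nil => simp [Prod.ext_iff]
  | cons i l ih =>
    simp only [List.foldl_cons]
    rw [ih, ih ((match pvGetA d i with | some t => ((0:Int) + t, (0:Int) + 1) | none => (0,0)))]
    cases pvGetA d i <;> simp [Prod.ext_iff] <;> omega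

theorem pvB_shift (l : List (Int × Int)) (a e : Int) (s : Int × Int) :
    l.foldl (fun (s : Int × Int) kv =>
      if a ≤ kv.1 ∧ kv.1 < e then (s.1 + kv.2, s.2 + 1) else s) s
    = s + l.foldl (fun (s : Int × Int) kv =>
      if a ≤ kv.1 ∧ kv.1 < e then (s.1 + kv.2, s.2 + 1) else s) (0, 0) := by
  induction l generalizing s with
  | nil => simp [Prod.ext_iff]
  | cons kv l ih =>
    simp only [List.foldl_cons]
    rw [ih, ih (if a ≤ kv.1 ∧ kv.1 < e then ((0:Int) + kv.2, (0:Int) + 1) else (0,0))]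
    split_ifs <;> simp [Prod.ext_iff] <;> omega

theorem pvBfold (a e : Int) (l : List (Int × Int)) :
    l.foldl (fun (s : Int × Int) kv =>
      if a ≤ kv.1 ∧ kv.1 < e then (s.1 + kv.2, s.2 + 1) else s) (0, 0) = pvF l a e := by
  induction l with
  | nil => rfl
  | cons kv l ih =>
    simp only [List.foldl_cons, pvF]
    rw [pvB_shift, ih]
    split_ifs <;> simp [Prod.ext_iff]

theorem pvB_eq_F (l : List (Int × Int)) (a e : Int) :
    countC_alt l a e = pvF l a (e + 1) :=
  pvBfold a (e + 1) l

theorem pvF_empty (xs : List (Int × Int)) (s e : Int) (h : e ≤ s) : pvF xs s e = (0, 0) := by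
  induction xs with
  | nil => rfl
  | cons kv rest ih =>
    obtain ⟨k, v⟩ := kv
    simp only [pvF]
    rw [if_neg (by omega), ih]

theorem pvF_not_mem (xs : List (Int × Int)) (s e : Int) (h : s ∉ xs.map Prod.fst) :
    pvF xs s e = pvF xs (s + 1) e := by
  induction xs with
  | nil => rfl
  | cons kv rest ih =>
    obtain ⟨k, v⟩ := kv
    simp only [List.map_cons, List.mem_cons] at h
    push_neg at h
    have hk : k ≠ s := fun hk => h.1 (by simp [hk])
    simp only [pvF]
    rw [ih h.2]
    by_cases h1 : s + 1 ≤ k ∧ k < e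
    · rw [if_pos (by omega), if_pos h1]
    · rw [if_neg (by omega), if_neg h1]

theorem pvF_step (xs : List (Int × Int)) (s e : Int) (hnd : (xs.map Prod.fst).Nodup)
    (hse : s < e) : pvF xs s e = pvC xs s + pvF xs (s + 1) e := by
  induction xs with
  | nil => simp [pvF, pvC, pvGetA]
  | cons kv rest ih =>
    obtain ⟨k, v⟩ := kv
    simp only [List.map_cons, List.nodup_cons] at hnd
    rw [pvC_cons]
    by_cases hk : k = s
    · subst hk
      rw [if_pos rfl]
      simp only [pvF]
      rw [pvF_not_mem rest k e hnd.1,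
        if_pos (⟨le_refl k, hse⟩ : k ≤ k ∧ k < e),
        if_neg (by omega : ¬(k + 1 ≤ k ∧ k < e))]
    · rw [if_neg hk]
      simp only [pvF]
      rw [ih hnd.2]
      have h1 : (s ≤ k ∧ k < e) ↔ (s + 1 ≤ k ∧ k < e) := by omega
      by_cases h2 : s + 1 ≤ k ∧ k < e
      · rw [if_pos (h1.mpr h2), if_pos h2]
        abel
      · rw [if_neg (fun h => h2 (h1.mp h)), if_neg h2]

theorem pvA_eq_F (d : List (Int × Int)) (hnd : (d.map Prod.fst).Nodup) (n : ℕ) :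
    ∀ s : Int, countC d s (s + n - 1) = pvF d s (s + n) := by
  induction n with
  | zero =>
    intro s
    unfold countC
    rw [show (s + (0:ℕ) - 1 + 1) = s by push_cast; ring, PySem.List.pyRange_one_eq_nil (le_refl s)]
    simp only [List.foldl_nil]
    exact (pvF_empty d s (s + (0:ℕ)) (by push_cast; omega)).symm
  | succ n ih =>
    intro s
    unfold countC
    have hlt : s < s + (n + 1 : ℕ) - 1 + 1 := by push_cast; omega
    rw [PySem.List.pyRange_one_cons hlt]
    simp only [List.foldl_cons]
    rw [pvA_shift]
    have h2 : s + (n + 1 : ℕ) - 1 + 1 = (s + 1) + (n : ℕ) - 1 + 1 := by push_cast; ring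
    have := ih (s + 1)
    unfold countC at this
    rw [h2, this]
    have hstep : pvF d s (s + (n + 1 : ℕ)) = pvC d s + pvF d (s + 1) (s + (n + 1 : ℕ)) :=
      pvF_step d s (s + (n + 1 : ℕ)) hnd (by push_cast; omega)
    rw [show (s + 1 + (n : ℕ)) = s + (n + 1 : ℕ) by push_cast; ring, hstep]
    cases h : pvGetA d s <;> simp [pvC, h]

-- ===== VERDICT (by name: the statement is the Claim_ definition above) =====
theorem countC_spec : Claim_equal_countC := by
  intro d s e _ hpre
  unfold Spec_countC
  rw [pvB_eq_F]
  by_cases h : e + 1 ≤ s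
  · unfold countC
    rw [PySem.List.pyRange_one_eq_nil h]
    simp only [List.foldl_nil]
    exact (pvF_empty d s (e + 1) (by omega)).symm
  · have hE : s + (((e + 1 - s).toNat : Int)) = e + 1 := by omega
    have h1 := pvA_eq_F d hpre (e + 1 - s).toNat s
    rw [hE] at h1
    rw [show e + 1 - 1 = e by ring] at h1
    exact h1
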